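-- pv_equiv track=rewrite | github.com/Fumihiro1/Currency-Exchange | Python/CurrencyExchangeV3.py | get_negative_cycle
-- ===== SOURCE A (Python) =====
-- def get_negative_cycle(predecessor, start):
--     cycle = [] # The nodes that are in the negative cycle
--     visited = set() # Keep track of visited Node
--     node = start # Set the current node to the start
--
--     # Trace the node backwards through the predecessor array
--     while node not in visited: # Loops until all nodes are visited
--         visited.add(node) # Add the node to visited Node
--         node = predecessor[node] # Move to the predecessor of the current node
--
--     cycle_start = node # The first node that was revisited
--     cycle.append(cycle_start) # Add the first node to the cycle
--     node = predecessor[cycle_start] # Move to the predecessor of the cycle start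
--
--     # Adds all the nodes to the cycle
--     while node != cycle_start: # While the cycle is incomplete
--         cycle.append(node)  # Add to cycle
--         node = predecessor[node] # go to predecessor
--
--     cycle.append(cycle_start) # Complete the cycle
--     cycle.reverse() # Since the cycle is backwards, reverse it
--     return cycle
-- ===== SOURCE B (Python) =====
-- def get_negative_cycle(predecessor, start):
--     # One predecessor walk recording the path; the cycle is the path suffix
--     # from the first revisited node, closed and reversed.
--     path = []
--     seen = {}
--     node = start
--     while node not in seen:
--         seen[node] = len(path)
--         path.append(node)
--         node = predecessor[node]
--     i = seen[node]
--     cycle = path[i:] + [node]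
--     cycle.reverse()
--     return cycle
-- ===== Notes on version B (the rewrite author's own statement) =====
-- stated objective: simpler
-- what changed: A's two walks (find the first revisited node, then re-walk the predecessors to re-collect the cycle) are replaced by a single walk that records the path with each node's index; the cycle is read off as the path suffix from the revisited node's index, closed and reversed.
-- outside the precondition, e.g. on get_negative_cycle({0: 0, 5: 7}, 0): A returns [0, 0], B returns [0, 0]
import Mathlib
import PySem

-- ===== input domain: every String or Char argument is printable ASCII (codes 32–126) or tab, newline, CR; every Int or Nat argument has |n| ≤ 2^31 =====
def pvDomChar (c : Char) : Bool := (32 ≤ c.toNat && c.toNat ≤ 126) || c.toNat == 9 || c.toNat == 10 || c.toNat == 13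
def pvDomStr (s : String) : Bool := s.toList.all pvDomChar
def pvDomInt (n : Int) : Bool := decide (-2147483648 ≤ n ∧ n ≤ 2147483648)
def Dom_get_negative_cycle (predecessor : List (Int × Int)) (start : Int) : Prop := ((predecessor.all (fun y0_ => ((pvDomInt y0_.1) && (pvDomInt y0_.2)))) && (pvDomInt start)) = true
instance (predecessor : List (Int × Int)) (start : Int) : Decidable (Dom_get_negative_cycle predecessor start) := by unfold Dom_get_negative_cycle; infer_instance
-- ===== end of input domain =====

-- B replaces A's two predecessor walks by one path-recording walk whose suffix from the
-- first revisited node is the cycle (objective: simpler; same O(n) cost).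


-- ===== PORT A =====
-- first while loop: trace predecessors from `start` until a node repeats
-- (fuel `|predecessor| + 1` is only a totality device: a node must repeat, or a
-- lookup fail, within that many steps; `none` = KeyError or fuel exhausted)
def pvA_find (pred : PySem.Dict Int Int) : Nat → PySem.Set Int → Int → Option Int
  | 0, _, _ => none
  | fuel+1, visited, node =>
    if visited.contains node then some node
    else
      match pred.get? node with
      | some nxt => pvA_find pred fuel (visited.add node) nxt
      | none => none

-- second while loop: collect the cycle nodes until `cycle_start` comes round again
def pvA_collect (pred : PySem.Dict Int Int) (cstart : Int) : Nat → List Int → Int → Option (List Int)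
  | 0, _, _ => none
  | fuel+1, cycle, node =>
    if node ≠ cstart then
      match pred.get? node with
      | some nxt => pvA_collect pred cstart fuel (cycle ++ [node]) nxt
      | none => none
    else some cycle

def get_negative_cycle (predecessor : List (Int × Int)) (start : Int) : List Int :=
  let pred : PySem.Dict Int Int := PySem.Dict.mk predecessor
  match pvA_find pred (predecessor.length + 1) (PySem.Set.ofList []) start with
  | none => []
  | some cstart =>
    match pred.get? cstart with
    | none => []
    | some n =>
      match pvA_collect pred cstart (predecessor.length + 1) [cstart] n with
      | none => []
      | some cyc => (cyc ++ [cstart]).reverse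

-- ===== PORT B =====
-- single walk: record the path and each node's index in `seen`; stop at the first repeat
def pvB_walk (pred : PySem.Dict Int Int) : Nat → List Int → PySem.Dict Int Int → Int → Option (List Int × PySem.Dict Int Int × Int)
  | 0, _, _, _ => none
  | fuel+1, path, seen, node =>
    match seen.get? node with
    | some _ => some (path, seen, node)
    | none =>
      match pred.get? node with
      | some nxt => pvB_walk pred fuel (path ++ [node]) (seen.insert node (path.length : Int)) nxt
      | none => none

def get_negative_cycle_alt (predecessor : List (Int × Int)) (start : Int) : List Int :=
  let pred : PySem.Dict Int Int := PySem.Dict.mk predecessor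
  match pvB_walk pred (predecessor.length + 1) [] PySem.Dict.empty start with
  | none => []
  | some (path, seen, node) =>
    let i := seen.getD node 0
    ((PySem.List.slice path (some i) none) ++ [node]).reverse

-- ===== PRECONDITION & SPEC =====
-- Pre_ excludes inputs on which the predecessor walk can leave the dict's keys (KeyError in
-- Python); requiring every stored value (and start) to be a key is slightly narrower than
-- "the walk from start happens to stay inside the keys", which is not a closed-form shape
-- condition, so a few inputs A returns on (unreached dangling values) are excluded too.
def Pre_get_negative_cycle (predecessor : List (Int × Int)) (start : Int) : Prop :=
  start ∈ predecessor.map Prod.fst ∧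
    ∀ p ∈ predecessor, p.2 ∈ predecessor.map Prod.fst
instance (predecessor : List (Int × Int)) (start : Int) : Decidable (Pre_get_negative_cycle predecessor start) := by unfold Pre_get_negative_cycle; infer_instance
def pvWitness_get_negative_cycle : (List (Int × Int)) × Int := ([(0, 1), (1, 2), (2, 1)], 0)

def Spec_get_negative_cycle (predecessor : List (Int × Int)) (start : Int) (out : List Int) : Prop := out = get_negative_cycle_alt predecessor start
instance (predecessor : List (Int × Int)) (start : Int) (out : List Int) : Decidable (Spec_get_negative_cycle predecessor start out) := by unfold Spec_get_negative_cycle; infer_instance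

-- ===== CLAIM (what is proved, stated in full; the proofs are below) =====
def Claim_equal_get_negative_cycle : Prop := ∀ (predecessor : List (Int × Int)) (start : Int), Dom_get_negative_cycle predecessor start → Pre_get_negative_cycle predecessor start → Spec_get_negative_cycle predecessor start (get_negative_cycle predecessor start)

-- ===== LEMMAS AND PROOFS =====

-- B's `seen` dict after recording `path` starting at index k
def pvSeen (path : List Int) (k : Nat) : PySem.Dict Int Int :=
  PySem.Dict.mk ((path.zipIdx k).map (fun p => (p.1, (p.2 : Int))))

theorem pvSeen_get?_of_not_mem (path : List Int) (k : Nat) (x : Int) (h : x ∉ path) :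
    (pvSeen path k).get? x = none := by
  induction path generalizing k with
  | nil => rfl
  | cons a l ih =>
    simp only [List.mem_cons, not_or] at h
    show (PySem.Dict.mk (((a :: l).zipIdx k).map (fun p => (p.1, (p.2 : Int))))).get? x = none
    rw [List.zipIdx_cons, List.map_cons, PySem.Dict.get?_mk_cons]
    have hax : (a == x) = false := by simp [Ne.symm h.1]
    simp only [hax, if_false, Bool.false_eq_true]
    exact ih (k + 1) h.2

theorem pvSeen_get?_of_mem (path : List Int) (k : Nat) (x : Int) (h : x ∈ path) :
    (pvSeen path k).get? x = some ((k + path.idxOf x : Nat) : Int) := by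
  induction path generalizing k with
  | nil => cases h
  | cons a l ih =>
    show (PySem.Dict.mk (((a :: l).zipIdx k).map (fun p => (p.1, (p.2 : Int))))).get? x = _
    rw [List.zipIdx_cons, List.map_cons, PySem.Dict.get?_mk_cons]
    by_cases hax : a = x
    · subst hax
      simp
    · have hax' : (a == x) = false := by simp [hax]
      have hx : x ∈ l := by
        rcases List.mem_cons.mp h with h1 | h1
        · exact absurd h1.symm hax
        · exact h1
      simp only [hax', if_false, Bool.false_eq_true]
      have hih := ih (k + 1) hx
      simp only [pvSeen] at hih
      rw [hih]
      simp only [List.idxOf_cons, hax', cond_false, Option.some.injEq]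
      push_cast
      ring

theorem pvSeen_insert (path : List Int) (x : Int) (h : x ∉ path) :
    (pvSeen path 0).insert x (path.length : Int) = pvSeen (path ++ [x]) 0 := by
  apply PySem.Dict.ext
  have hc : (pvSeen path 0).contains x = false := by
    rw [PySem.Dict.contains_eq_isSome_get?, pvSeen_get?_of_not_mem path 0 x h]
    rfl
  rw [PySem.Dict.items_insert_of_not_contains _ _ hc]
  show ((path.zipIdx 0).map (fun p => (p.1, (p.2 : Int)))) ++ [(x, (path.length : Int))] =
    (((path ++ [x]).zipIdx 0).map (fun p => (p.1, (p.2 : Int))))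
  rw [List.zipIdx_append, List.map_append]
  simp [List.zipIdx_cons]

theorem pvNodupSnoc (path : List Int) (node : Int) (h : path.Nodup) (hm : node ∉ path) :
    (path ++ [node]).Nodup := by
  simp only [List.nodup_append, List.nodup_singleton, true_and]
  exact ⟨h, fun a ha b hb => fun hab => hm ((List.mem_singleton.mp hb) ▸ hab ▸ ha)⟩

-- the two first-phase loops move in lockstep and stop at the same node
theorem pvAB_walk (pred : PySem.Dict Int Int) (fuel : Nat) :
    ∀ (path : List Int) (node : Int), path.Nodup →
      pvA_find pred fuel (PySem.Set.ofList path) node =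
        (pvB_walk pred fuel path (pvSeen path 0) node).map (fun r => r.2.2) := by
  induction fuel with
  | zero => intro path node _; rfl
  | succ f ih =>
    intro path node hnd
    by_cases hmem : node ∈ path
    · have hA : (PySem.Set.ofList path).contains node = true :=
        (PySem.Set.contains_iff _ _).mpr ((PySem.Set.mem_ofList _ _).mpr hmem)
      have hB := pvSeen_get?_of_mem path 0 node hmem
      simp only [pvA_find, pvB_walk]
      rw [hA, hB]
      simp
    · have hA : (PySem.Set.ofList path).contains node = false := by
        rw [Bool.eq_false_iff]
        intro hcon
        exact hmem ((PySem.Set.mem_ofList _ _).mp ((PySem.Set.contains_iff _ _).mp hcon))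
      have hB := pvSeen_get?_of_not_mem path 0 node hmem
      have hset : (PySem.Set.ofList path).add node = PySem.Set.ofList (path ++ [node]) :=
        (PySem.Set.ofList_append_singleton path node).symm
      have hnd' : (path ++ [node]).Nodup := pvNodupSnoc path node hnd hmem
      cases hg : pred.get? node with
      | none =>
        simp only [pvA_find, pvB_walk]
        rw [hA, hB, hg]
        simp
      | some nxt =>
        simp only [pvA_find, pvB_walk]
        rw [hA, hB, hg]
        simp only [Bool.false_eq_true, if_false]
        rw [hset, pvSeen_insert path node hmem]
        exact ih (path ++ [node]) nxt hnd'

-- what B's walk returns: a duplicate-free chain of predecessors ending at a repeat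
theorem pvB_walk_spec (pred : PySem.Dict Int Int) (fuel : Nat) :
    ∀ (path : List Int) (node : Int) P seen' c, path.Nodup →
      List.IsChain (fun a b => pred.get? a = some b) (path ++ [node]) →
      pvB_walk pred fuel path (pvSeen path 0) node = some (P, seen', c) →
      seen' = pvSeen P 0 ∧ P.Nodup ∧ c ∈ P ∧
        List.IsChain (fun a b => pred.get? a = some b) (P ++ [c]) := by
  induction fuel with
  | zero => intro path node P seen' c _ _ h; cases h
  | succ f ih =>
    intro path node P seen' c hnd hchain heq
    by_cases hmem : node ∈ path
    · have hB := pvSeen_get?_of_mem path 0 node hmem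
      simp only [pvB_walk, hB] at heq
      obtain ⟨rfl, rfl, rfl⟩ : P = path ∧ seen' = pvSeen path 0 ∧ c = node := by
        have := heq.symm
        simpa [Prod.ext_iff] using this
      exact ⟨rfl, hnd, hmem, hchain⟩
    · have hB := pvSeen_get?_of_not_mem path 0 node hmem
      cases hg : pred.get? node with
      | none => simp [pvB_walk, hB, hg] at heq
      | some nxt =>
        simp only [pvB_walk, hB, hg] at heq
        rw [pvSeen_insert path node hmem] at heq
        have hnd' : (path ++ [node]).Nodup := pvNodupSnoc path node hnd hmem
        have hchain' : List.IsChain (fun a b => pred.get? a = some b) ((path ++ [node]) ++ [nxt]) := by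
          rw [List.isChain_append]
          refine ⟨hchain, by simp, ?_⟩
          simp [hg]
        exact ih (path ++ [node]) nxt P seen' c hnd' hchain' heq

theorem pvChain_subset_keys (pred : PySem.Dict Int Int) (P : List Int) (c : Int)
    (h : List.IsChain (fun a b => pred.get? a = some b) (P ++ [c])) :
    ∀ x ∈ P, x ∈ pred.keys := by
  induction P with
  | nil => intro x hx; cases hx
  | cons a l ih =>
    intro x hx
    have htail : List.IsChain (fun a b => pred.get? a = some b) (l ++ [c]) := by
      have := h.tail
      simpa using this
    rcases List.mem_cons.mp hx with h1 | h1
    · subst h1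
      have hhead : ∃ y, pred.get? x = some y := by
        cases l with
        | nil => exact ⟨c, (List.isChain_cons_cons.mp h).1⟩
        | cons b l' => exact ⟨b, (List.isChain_cons_cons.mp h).1⟩
      obtain ⟨y, hy⟩ := hhead
      by_contra hk
      rw [(PySem.Dict.get?_eq_none_iff_not_mem_keys pred x).mpr hk] at hy
      cases hy
    · exact ih htail x h1

-- the first step out of `x` along a chain `x :: l ++ [c]`
theorem pvChain_head (pred : PySem.Dict Int Int) (x c : Int) (l : List Int)
    (h : List.IsChain (fun a b => pred.get? a = some b) (x :: (l ++ [c]))) :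
    pred.get? x = some (l.headD c) := by
  cases l with
  | nil => exact (List.isChain_cons_cons.mp h).1
  | cons b l' => exact (List.isChain_cons_cons.mp h).1

-- A's second loop re-collects exactly the chain up to the return of `c`
theorem pvA_collect_spec (pred : PySem.Dict Int Int) (c : Int) :
    ∀ (l : List Int) (fuel : Nat) (acc : List Int), l.length < fuel →
      (∀ x ∈ l, x ≠ c) →
      List.IsChain (fun a b => pred.get? a = some b) (l ++ [c]) →
      pvA_collect pred c fuel acc (l.headD c) = some (acc ++ l) := by
  intro l
  induction l with
  | nil =>
    intro fuel acc hf _ _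
    cases fuel with
    | zero => omega
    | succ f => simp [pvA_collect]
  | cons x xs ih =>
    intro fuel acc hf hne hchain
    cases fuel with
    | zero => simp at hf
    | succ f =>
      have hxc : x ≠ c := hne x (List.mem_cons_self ..)
      have hg : pred.get? x = some (xs.headD c) := pvChain_head pred x c xs (by simpa using hchain)
      have htail : List.IsChain (fun a b => pred.get? a = some b) (xs ++ [c]) := by
        have := hchain.tail
        simpa using this
      show pvA_collect pred c (f + 1) acc ((x :: xs).headD c) = _
      simp only [List.headD_cons, pvA_collect]
      rw [if_pos hxc, hg]
      change pvA_collect pred c f (acc ++ [x]) (xs.headD c) = _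
      rw [ih f (acc ++ [x]) (by simpa using Nat.lt_of_succ_lt_succ hf)
        (fun y hy => hne y (List.mem_cons_of_mem x hy)) htail]
      simp

-- ===== VERDICT (by name: the statement is the Claim_ definition above) =====
theorem get_negative_cycle_spec : Claim_equal_get_negative_cycle := by
  intro predecessor start hdom hpre
  unfold Spec_get_negative_cycle get_negative_cycle get_negative_cycle_alt
  simp only []
  set pred : PySem.Dict Int Int := PySem.Dict.mk predecessor with hpredDef
  set L : Nat := predecessor.length with hL
  have hAB := pvAB_walk pred (L + 1) [] start List.nodup_nil
  have hempty : pvSeen [] 0 = (PySem.Dict.empty : PySem.Dict Int Int) := rfl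
  rw [hempty] at hAB
  cases hw : pvB_walk pred (L + 1) [] PySem.Dict.empty start with
  | none =>
    have hfind : pvA_find pred (L + 1) (PySem.Set.ofList []) start = none := by
      rw [hAB, hw]; rfl
    rw [hfind]
  | some t =>
    obtain ⟨P, seen', c⟩ := t
    have hfind : pvA_find pred (L + 1) (PySem.Set.ofList []) start = some c := by
      rw [hAB, hw]; rfl
    have hspec := pvB_walk_spec pred (L + 1) [] start P seen' c List.nodup_nil
      (by simp) (by rw [hempty]; exact hw)
    obtain ⟨hseen, hndP, hcP, hchainP⟩ := hspec
    set i := P.idxOf c with hi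
    have hilt : i < P.length := List.idxOf_lt_length_of_mem hcP
    set l := P.drop (i + 1) with hl
    have hdropi : P.drop i = c :: l := by
      rw [List.drop_eq_getElem_cons hilt, List.getElem_idxOf hilt]
    have hchain2 : List.IsChain (fun a b => pred.get? a = some b) ((c :: l) ++ [c]) := by
      have := hchainP.drop i
      rwa [List.drop_append_of_le_length (le_of_lt hilt), hdropi] at this
    have hgc : pred.get? c = some (l.headD c) := pvChain_head pred c c l (by simpa using hchain2)
    have hnl : ∀ x ∈ l, x ≠ c := by
      have hnd2 : (c :: l).Nodup := by
        rw [← hdropi]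
        exact (List.drop_sublist i P).nodup hndP
      intro x hx heq
      exact (List.nodup_cons.mp hnd2).1 (heq ▸ hx)
    have hPlen : P.length ≤ L := by
      have h1 := (hndP.subperm (fun x hx => pvChain_subset_keys pred P c hchainP x hx)).length_le
      have h2 : pred.keys.length = L := by
        simp [PySem.Dict.keys, hpredDef, hL]
      omega
    have hllen : l.length < L + 1 := by
      have : l.length = P.length - (i + 1) := by rw [hl, List.length_drop]
      omega
    have hcollect := pvA_collect_spec pred c l (L + 1) [c] hllen hnl (by simpa using hchain2.tail)
    have hgetD : seen'.getD c 0 = ((i : Nat) : Int) := by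
      rw [hseen, PySem.Dict.getD_eq_get?_getD, pvSeen_get?_of_mem P 0 c hcP]
      simp [hi]
    rw [hfind]
    simp only [hgc, hcollect]
    simp [hgetD, PySem.List.slice_from_natCast, hdropi]
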